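-- pv_equiv track=rewrite | github.com/pypi-data/pypi-mirror-383 | packages/pm4mkb/pm4mkb-0.1.4-py3-none-any.whl/pm4mkb/miners/_abstract_miner.py | _get_causal_parallel_pairs
-- ===== SOURCE A (Python) =====
-- def _get_causal_parallel_pairs(follows_pairs):
--     """
--     Returns two list of pairs of activities that have causal and parallel relation.
--
--     "activity_1" and "activity_2" have causal relation ("activity_1 -> activity_2") if
--         "activity_1 > activity_2" and not "activity_2 > activity_1"
--     "activity_1" and "activity_2" have parallel relation ("activity_1 || activity_2") if
--         "activity_1 > activity_2" and "activity_2 > activity_1"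
--     "activity_1 > activity_2" means that "activity_1" is directly followed by "activity_2" in at least
--         one event trace in the event log.
--
--     Returns
--     -------
--     causal_pairs : set of tuples (str, str)
--         Pairs (activity_1, activity_2) that have causal relation: "activity_1 -> activity_2"
--
--     parallel_pairs : set of tuples (str, str)
--         Pairs (activity_1, activity_2) that have parallel relation: "activity_1 || activity_2"
--     """
--     causal_pairs = set()
--     parallel_pairs = set()
--     for pair in follows_pairs:
--         if pair[::-1] not in follows_pairs:
--             causal_pairs.add(pair)
--         elif pair[::-1] in follows_pairs:
--             parallel_pairs.add(pair)
--     return causal_pairs, parallel_pairs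
-- ===== SOURCE B (Python) =====
-- def _get_causal_parallel_pairs(follows_pairs):
--     # Group the distinct pairs by their canonical (sorted) unordered key and count
--     # orientations per key: a bucket of size 2 (or a self-loop) means both directions
--     # occur, i.e. the pair is parallel; a bucket of size 1 on a non-loop means causal.
--     distinct = list(dict.fromkeys(follows_pairs))
--     keys = [(a, b) if a <= b else (b, a) for (a, b) in distinct]
--     counts = {}
--     for k in keys:
--         counts[k] = counts.get(k, 0) + 1
--     causal, parallel = set(), set()
--     for p, k in zip(distinct, keys):
--         if p[0] == p[1] or counts[k] == 2:
--             parallel.add(p)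
--         else:
--             causal.add(p)
--     return causal, parallel
-- ===== Notes on version B (the rewrite author's own statement) =====
-- stated objective: faster
-- what changed: Replaces A's per-pair reversed-membership scan of the input list by canonical-key bucketing: dedup the pairs, count orientations per sorted (canonical) unordered key in a dict, then classify each distinct pair as parallel iff it is a self-loop or its key's bucket has both orientations (count 2), else causal.
import Mathlib
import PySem

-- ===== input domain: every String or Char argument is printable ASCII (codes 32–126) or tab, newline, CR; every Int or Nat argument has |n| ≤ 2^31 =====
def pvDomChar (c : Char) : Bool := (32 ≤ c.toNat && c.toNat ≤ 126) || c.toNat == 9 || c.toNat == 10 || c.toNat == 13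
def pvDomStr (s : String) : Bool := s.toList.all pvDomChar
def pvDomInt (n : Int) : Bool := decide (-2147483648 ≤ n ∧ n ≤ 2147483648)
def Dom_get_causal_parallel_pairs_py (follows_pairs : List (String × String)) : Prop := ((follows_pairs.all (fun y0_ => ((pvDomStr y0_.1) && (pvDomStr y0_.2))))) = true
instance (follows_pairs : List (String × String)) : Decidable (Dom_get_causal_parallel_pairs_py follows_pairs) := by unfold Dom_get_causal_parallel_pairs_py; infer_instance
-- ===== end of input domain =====

-- B classifies pairs by canonical-key bucketing (dedup, count orientations per unordered key,
-- parallel iff self-loop or bucket of size 2) instead of A's reversed-membership scan of the input list.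

-- ===== PORT A =====
-- pair[::-1] on a 2-tuple is the swapped pair; ported by hand as (pair.2, pair.1) — exact.
def get_causal_parallel_pairs_py (follows_pairs : List (String × String)) : (List (String × String)) × (List (String × String)) :=
  follows_pairs.foldl (fun st pair =>
    if (pair.2, pair.1) ∉ follows_pairs then (PySem.Set.add st.1 pair, st.2)
    else if (pair.2, pair.1) ∈ follows_pairs then (st.1, PySem.Set.add st.2 pair)
    else st) (PySem.Set.empty, PySem.Set.empty)

-- ===== PORT B =====
-- the canonical (sorted) unordered key of a pair: (a, b) if a <= b else (b, a);
-- Lean's String ≤ is code-point lexicographic, exact for Python's str comparison.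
def pvCanon (p : String × String) : String × String := if p.1 ≤ p.2 then p else (p.2, p.1)

-- counts[k] is looked up only at keys k ∈ keys, where the key is present, so getD _ 0 is exact.
def get_causal_parallel_pairs_py_alt (follows_pairs : List (String × String)) : (List (String × String)) × (List (String × String)) :=
  let distinct := PySem.List.dedup follows_pairs
  let keys := distinct.map pvCanon
  let counts : PySem.Dict (String × String) Int :=
    keys.foldl (fun d k => d.insert k (d.getD k 0 + 1)) PySem.Dict.empty
  (distinct.zip keys).foldl (fun st x =>
    if x.1.1 == x.1.2 || counts.getD x.2 0 == 2 then (st.1, PySem.Set.add st.2 x.1)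
    else (PySem.Set.add st.1 x.1, st.2)) (PySem.Set.empty, PySem.Set.empty)

-- ===== PRECONDITION & SPEC =====
def Spec_get_causal_parallel_pairs_py (follows_pairs : List (String × String)) (out : (List (String × String)) × (List (String × String))) : Prop := out = get_causal_parallel_pairs_py_alt follows_pairs
instance (follows_pairs : List (String × String)) (out : (List (String × String)) × (List (String × String))) : Decidable (Spec_get_causal_parallel_pairs_py follows_pairs out) := by unfold Spec_get_causal_parallel_pairs_py; infer_instance

-- ===== CLAIM (what is proved, stated in full; the proofs are below) =====
def Claim_equal_get_causal_parallel_pairs_py : Prop := ∀ (follows_pairs : List (String × String)), Dom_get_causal_parallel_pairs_py follows_pairs → Spec_get_causal_parallel_pairs_py follows_pairs (get_causal_parallel_pairs_py follows_pairs)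

-- ===== LEMMAS AND PROOFS =====

-- set(filter) = filter(set): first-occurrence dedup commutes with a pointwise filter
theorem pv_ofList_filter {α : Type} [BEq α] [LawfulBEq α] (q : α → Bool) (l : List α) :
    PySem.Set.ofList (l.filter q) = (PySem.Set.ofList l).filter q := by
  induction l with
  | nil => rfl
  | cons x xs ih =>
    by_cases hq : q x = true
    · simp only [List.filter_cons, hq, if_pos, PySem.Set.ofList_cons, ih, PySem.Set.discard,
        List.filter_filter]
      congr 1
      apply List.filter_congr
      intro a _
      simp [Bool.and_comm]
    · have hx : q x = false := by simpa using hq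
      simp only [List.filter_cons, hx, Bool.false_eq_true, if_false, PySem.Set.ofList_cons,
        PySem.Set.discard, List.filter_filter, ih]
      apply List.filter_congr
      intro a _
      by_cases hqa : q a = true
      · have hne : (a == x) = false := by
          by_contra hbe
          have hax : a = x := by
            have : (a == x) = true := by revert hbe; cases (a == x) <;> simp
            exact eq_of_beq this
          rw [hax] at hqa; exact hq hqa
        simp [hqa, hne]
      · have : q a = false := by simpa using hqa
        simp [this]

-- the loop of A splits into the two filtered add-folds
theorem pv_fold_split (fp : List (String × String)) (l : List (String × String)) :
    ∀ ca pa : PySem.Set (String × String),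
      l.foldl (fun st pair =>
          if (pair.2, pair.1) ∉ fp then (PySem.Set.add st.1 pair, st.2)
          else if (pair.2, pair.1) ∈ fp then (st.1, PySem.Set.add st.2 pair)
          else st) (ca, pa)
      = ((l.filter (fun p => !(decide ((p.2, p.1) ∈ fp)))).foldl PySem.Set.add ca,
         (l.filter (fun p => decide ((p.2, p.1) ∈ fp))).foldl PySem.Set.add pa) := by
  induction l with
  | nil => intro ca pa; rfl
  | cons x xs ih =>
    intro ca pa
    by_cases h : (x.2, x.1) ∈ fp
    · rw [List.foldl_cons, if_neg (by simp [h]), if_pos h, ih]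
      simp [h]
    · rw [List.foldl_cons, if_pos h, ih]
      simp [h]

-- the classification loop of B splits into the two filtered add-folds (adding the pair component)
theorem pv_fold_split_alt (q : (String × String) × (String × String) → Bool)
    (l : List ((String × String) × (String × String))) :
    ∀ ca pa : PySem.Set (String × String),
      l.foldl (fun st x =>
          if q x then (st.1, PySem.Set.add st.2 x.1)
          else (PySem.Set.add st.1 x.1, st.2)) (ca, pa)
      = (((l.filter (fun x => !q x)).map Prod.fst).foldl PySem.Set.add ca,
         ((l.filter q).map Prod.fst).foldl PySem.Set.add pa) := by
  induction l with
  | nil => intro ca pa; rfl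
  | cons x xs ih =>
    intro ca pa
    by_cases h : q x = true
    · rw [List.foldl_cons, if_pos h, ih]
      simp [h]
    · have h' : q x = false := by simpa using h
      rw [List.foldl_cons, if_neg (by simp [h']), ih]
      simp [h']

-- filtering the (x, f x) zip and projecting is filtering the list itself
theorem pv_zip_map_filter (f : (String × String) → (String × String))
    (q : (String × String) × (String × String) → Bool) (xs : List (String × String)) :
    ((xs.zip (xs.map f)).filter q).map Prod.fst = xs.filter (fun x => q (x, f x)) := by
  induction xs with
  | nil => rfl
  | cons x t ih =>
    simp only [List.map_cons, List.zip_cons_cons, List.filter_cons]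
    by_cases h : q (x, f x) = true
    · simp [h, ih]
    · have h' : q (x, f x) = false := by simpa using h
      simp [h', ih]

-- a Nodup list is already its own set
theorem pv_ofList_nodup {α : Type} [BEq α] [LawfulBEq α] (l : List α) (h : l.Nodup) :
    PySem.Set.ofList l = l := by
  induction l with
  | nil => rfl
  | cons x xs ih =>
    have hx : x ∉ xs := (List.nodup_cons.mp h).1
    rw [PySem.Set.ofList_cons, ih (List.nodup_cons.mp h).2]
    simp only [PySem.Set.discard]
    congr 1
    rw [List.filter_eq_self]
    intro a ha
    simp only [Bool.not_eq_eq_eq_not, Bool.not_true, beq_eq_false_iff_ne, ne_eq]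
    intro rfl_eq; exact hx (rfl_eq ▸ ha)

-- two pvCanon-equal pairs are the pair or its swap
theorem pv_canon_eq_iff (x p : String × String) :
    pvCanon x = pvCanon p ↔ (x = p ∨ x = (p.2, p.1)) := by
  obtain ⟨c, d⟩ := x; obtain ⟨a, b⟩ := p
  simp only [pvCanon, Prod.mk.injEq]
  constructor
  · intro h
    split_ifs at h with h1 h2 h2 <;> simp only [Prod.mk.injEq] at h
    · exact Or.inl h
    · exact Or.inr h
    · exact Or.inr ⟨h.2, h.1⟩
    · exact Or.inl ⟨h.2, h.1⟩
  · intro h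
    rcases h with ⟨rfl, rfl⟩ | ⟨rfl, rfl⟩
    · rfl
    · rcases le_total c d with hcd | hdc
      · by_cases hdc2 : d ≤ c
        · have : c = d := le_antisymm hcd hdc2
          subst this; simp
        · simp [hcd, hdc2]
      · by_cases hcd2 : c ≤ d
        · have : c = d := le_antisymm hcd2 hdc
          subst this; simp
        · simp [hdc, hcd2]

-- counting a disjunction of two distinct values
theorem pv_countP_or (p q : String × String) (hne : p ≠ q) (l : List (String × String)) :
    l.countP (fun x => decide (x = p ∨ x = q)) = l.count p + l.count q := by
  induction l with
  | nil => rfl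
  | cons y t ih =>
    simp only [List.countP_cons, List.count_cons, ih]
    by_cases hp : y = p
    · subst hp
      have hq : ¬(y = q) := hne
      simp [hq]
      omega
    · by_cases hq : y = q
      · subst hq
        simp [hp]
        omega
      · simp [hp, hq]

-- on a first-occurrence dedup of fp, B's bucket test agrees with A's reversed-membership test
theorem pv_pred_eq (fp : List (String × String)) (p : String × String) (hp : p ∈ fp) :
    (p.1 == p.2 ||
      ((((PySem.List.dedup fp).map pvCanon).foldl
          (fun d k => d.insert k (d.getD k 0 + 1)) PySem.Dict.empty :
            PySem.Dict (String × String) Int).getD (pvCanon p) 0 == 2))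
      = decide ((p.2, p.1) ∈ fp) := by
  have hcount : ((((PySem.List.dedup fp).map pvCanon).foldl
      (fun d k => d.insert k (d.getD k 0 + 1)) PySem.Dict.empty :
        PySem.Dict (String × String) Int)).getD (pvCanon p) 0
      = (((PySem.List.dedup fp).map pvCanon).count (pvCanon p) : Int) := by
    rw [PySem.Dict.getD_foldl_insert_add_one]
    simp [PySem.Dict.getD, PySem.Dict.empty, PySem.Dict.get?]
  have hcntP : ((PySem.List.dedup fp).map pvCanon).count (pvCanon p)
      = (PySem.List.dedup fp).countP (fun x => decide (pvCanon x = pvCanon p)) := by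
    simp only [List.count, List.countP_map]
    apply List.countP_congr
    intro a _
    simp [Function.comp]
  have hmemd : p ∈ PySem.List.dedup fp := (PySem.List.mem_dedup fp p).mpr hp
  have hnd : (PySem.List.dedup fp).Nodup := PySem.List.nodup_dedup fp
  by_cases hself : p.1 = p.2
  · have hswap : (p.2, p.1) = p := by
      obtain ⟨a, b⟩ := p; simp_all
    rw [hswap]
    simp [hself, hp]
  · have hswapne : (p.2, p.1) ≠ p := by
      obtain ⟨a, b⟩ := p
      simp only [ne_eq, Prod.mk.injEq, not_and]
      intro h _; exact hself h.symm
    have hcc : (PySem.List.dedup fp).countP (fun x => decide (pvCanon x = pvCanon p))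
        = (PySem.List.dedup fp).countP (fun x => decide (x = p ∨ x = (p.2, p.1))) := by
      apply List.countP_congr
      intro a _
      simp [pv_canon_eq_iff]
    have hor : (PySem.List.dedup fp).countP (fun x => decide (x = p ∨ x = (p.2, p.1)))
        = (PySem.List.dedup fp).count p + (PySem.List.dedup fp).count (p.2, p.1) :=
      pv_countP_or p (p.2, p.1) (fun h => hswapne h.symm) _
    have hcp : (PySem.List.dedup fp).count p = 1 := List.count_eq_one_of_mem hnd hmemd
    by_cases hrev : (p.2, p.1) ∈ fp
    · have : (PySem.List.dedup fp).count (p.2, p.1) = 1 :=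
        List.count_eq_one_of_mem hnd ((PySem.List.mem_dedup fp (p.2, p.1)).mpr hrev)
      rw [hcount, hcntP, hcc, hor, hcp, this]
      simp [hrev]
    · have : (PySem.List.dedup fp).count (p.2, p.1) = 0 :=
        List.count_eq_zero_of_not_mem (fun h => hrev ((PySem.List.mem_dedup fp (p.2, p.1)).mp h))
      rw [hcount, hcntP, hcc, hor, hcp, this]
      simp [hself, hrev]

theorem get_causal_parallel_pairs_py_eq (fp : List (String × String)) :
    get_causal_parallel_pairs_py fp = get_causal_parallel_pairs_py_alt fp := by
  unfold get_causal_parallel_pairs_py get_causal_parallel_pairs_py_alt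
  rw [pv_fold_split fp fp, pv_fold_split_alt]
  have hfa : ∀ (l : List (String × String)),
      l.foldl PySem.Set.add PySem.Set.empty = PySem.Set.ofList l := fun _ => rfl
  rw [hfa, hfa, hfa, hfa, pv_ofList_filter, pv_ofList_filter,
      pv_zip_map_filter, pv_zip_map_filter]
  have hnd : (PySem.List.dedup fp).Nodup := PySem.List.nodup_dedup fp
  rw [pv_ofList_nodup _ (hnd.filter _), pv_ofList_nodup _ (hnd.filter _)]
  have hofl : PySem.Set.ofList fp = PySem.List.dedup fp := (PySem.List.dedup_eq_ofList fp).symm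
  rw [hofl]
  refine Prod.ext ?_ ?_ <;>
  · simp only
    apply List.filter_congr
    intro a ha
    have hmem : a ∈ fp := (PySem.List.mem_dedup fp a).mp ha
    rw [pv_pred_eq fp a hmem]

-- ===== VERDICT (by name: the statement is the Claim_ definition above) =====
theorem get_causal_parallel_pairs_py_spec : Claim_equal_get_causal_parallel_pairs_py := by
  intro fp _
  unfold Spec_get_causal_parallel_pairs_py
  exact get_causal_parallel_pairs_py_eq fp
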